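-- pv_equiv track=rewrite | github.com/cristinadece/TwitterCrisis | util/ngrams.py | window_no_twitter_elems
-- ===== SOURCE A (Python) =====
-- from itertools import islice
--
-- def contains_non_words(iterable):
--     for elem in iterable:
--         if elem.startswith('http') or elem.startswith('#') or elem.startswith("@"):
--             return True
--     return False
--
-- def window_no_twitter_elems(seq, n=2):
--     it = iter(seq)
--     result = tuple(islice(it, n))
--     if (len(result) == n) and ( not contains_non_words(result)):
--         yield u' '.join(result)
--     for elem in it:
--         result = result[1:] + (elem,)
--         if not contains_non_words(result):
--             yield u' '.join(result)
-- ===== SOURCE B (Python) =====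
-- def window_no_twitter_elems(seq, n=2):
--     seq = list(seq)
--     if n > len(seq):
--         return []
--     # prefix counts of excluded tokens: pre[i] = number of twitter tokens among seq[:i]
--     pre = [0]
--     for w in seq:
--         pre.append(pre[-1] + w.startswith(('http', '#', '@')))
--     return [' '.join(seq[i:i + n]) for i in range(len(seq) - n + 1)
--             if pre[i + n] == pre[i]]
-- ===== Notes on version B (the rewrite author's own statement) =====
-- stated objective: faster
-- what changed: B replaces A's per-window rescan (contains_non_words over every length-n window) by one prefix-count pass over the sequence, so each window is admitted or rejected by a single O(1) prefix-difference comparison.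
-- intended difference: For n = 0 on a sequence containing a non-empty token, A returns '' followed by the sliding size-1 windows (its empty window tuple degenerates into singletons, a leftover-state artefact), while B returns the empty join of each of the len+1 empty windows, the consistent meaning of 0-grams. — e.g. on window_no_twitter_elems(["a"], 0): A returns ["", "a"], B returns ["", ""]
import Mathlib
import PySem

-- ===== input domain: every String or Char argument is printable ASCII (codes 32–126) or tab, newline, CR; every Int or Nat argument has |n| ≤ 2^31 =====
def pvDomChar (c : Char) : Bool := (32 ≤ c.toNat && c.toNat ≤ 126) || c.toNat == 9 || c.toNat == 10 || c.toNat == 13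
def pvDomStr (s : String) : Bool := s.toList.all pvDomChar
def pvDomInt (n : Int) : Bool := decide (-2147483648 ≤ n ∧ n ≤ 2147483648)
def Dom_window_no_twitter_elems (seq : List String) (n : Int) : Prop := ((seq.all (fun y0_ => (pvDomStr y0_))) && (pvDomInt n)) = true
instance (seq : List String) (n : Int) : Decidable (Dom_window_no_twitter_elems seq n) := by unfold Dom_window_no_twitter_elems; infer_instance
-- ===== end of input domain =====

-- B replaces A's per-window rescan for twitter tokens by one prefix-count pass (O(1) per window check);
-- the equivalence is about the returned list of yields of the generator A.

-- ===== PORT A =====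
def pvBad (e : String) : Bool :=
  PySem.Str.startswith e "http" || PySem.Str.startswith e "#" || PySem.Str.startswith e "@"

def containsNonWords : List String → Bool
  | [] => false
  | e :: rest => if pvBad e then true else containsNonWords rest

def pvAGo : List String → List String → List String → List String
  | _, [], acc => acc
  | result, e :: rs, acc =>
    let result' := result.drop 1 ++ [e]
    pvAGo result' rs
      (if containsNonWords result' then acc else acc ++ [PySem.Str.join " " result'])

def window_no_twitter_elems (seq : List String) (n : Int) : List String :=
  -- islice(it, n) = first min(n, len) elements; for n < 0 islice raises ValueError (excluded by Pre_)
  let result := seq.take n.toNat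
  let rest := seq.drop n.toNat
  let acc0 :=
    if ((result.length : Int) == n) && !containsNonWords result
    then [PySem.Str.join " " result] else []
  pvAGo result rest acc0

-- ===== PORT B =====
-- w.startswith(('http', '#', '@')) is the same predicate as A's test; one shared helper
def window_no_twitter_elems_alt (seq : List String) (n : Int) : List String :=
  if (seq.length : Int) < n then []  -- 'if n > len(seq): return []'
  else
    -- pre[-1] is getLast!; exact since pre is never empty
    let pre := seq.foldl (fun p w => p ++ [p.getLast! + (if pvBad w then 1 else 0)]) ([0] : List Int)
    -- pre[i+n] and pre[i] are in range for every i the range produces (0 ≤ n ≤ len), so pyGetD is exact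
    (PySem.List.pyRange 0 ((seq.length : Int) - n + 1) 1).filterMap (fun i =>
      if PySem.List.pyGetD pre (i + n) 0 == PySem.List.pyGetD pre i 0 then
        some (PySem.Str.join " " (PySem.List.slice seq (some i) (some (i + n))))
      else none)

-- ===== PRECONDITION & SPEC =====
-- Pre_ excludes n < 0, on which A raises ValueError (islice with a negative stop).
def Pre_window_no_twitter_elems (seq : List String) (n : Int) : Prop := 0 ≤ n
instance (seq : List String) (n : Int) : Decidable (Pre_window_no_twitter_elems seq n) := by
  unfold Pre_window_no_twitter_elems; infer_instance

def pvWitness_window_no_twitter_elems : List String × Int := (["a", "b", "#c"], 2)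

-- For n = 0 on a sequence with a non-empty token, A returns '' followed by the sliding size-1
-- windows (its empty window tuple degenerates into singletons, a leftover-state artefact),
-- while B returns the empty join of each of the len+1 empty windows, the consistent meaning of 0-grams.
def D_window_no_twitter_elems (seq : List String) (n : Int) : Prop :=
  n = 0 ∧ ∃ x ∈ seq, x ≠ ""
instance (seq : List String) (n : Int) : Decidable (D_window_no_twitter_elems seq n) := by
  unfold D_window_no_twitter_elems; infer_instance

def Spec_window_no_twitter_elems (seq : List String) (n : Int) (out : List String) : Prop :=
  ¬ D_window_no_twitter_elems seq n → out = window_no_twitter_elems_alt seq n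
instance (seq : List String) (n : Int) (out : List String) : Decidable (Spec_window_no_twitter_elems seq n out) := by
  unfold Spec_window_no_twitter_elems; infer_instance

def pvDiffWitness_window_no_twitter_elems : List String × Int := (["a"], 0)
def pvDiffWitnessOut_window_no_twitter_elems : (List String) × (List String) := (["", "a"], ["", ""])

-- ===== CLAIM =====
def Claim_unchanged_window_no_twitter_elems : Prop :=
  ∀ (seq : List String) (n : Int), Dom_window_no_twitter_elems seq n →
    Pre_window_no_twitter_elems seq n →
    Spec_window_no_twitter_elems seq n (window_no_twitter_elems seq n)

def Claim_changed_window_no_twitter_elems : Prop :=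
  Dom_window_no_twitter_elems (pvDiffWitness_window_no_twitter_elems.1) (pvDiffWitness_window_no_twitter_elems.2) ∧
  Pre_window_no_twitter_elems (pvDiffWitness_window_no_twitter_elems.1) (pvDiffWitness_window_no_twitter_elems.2) ∧
  D_window_no_twitter_elems (pvDiffWitness_window_no_twitter_elems.1) (pvDiffWitness_window_no_twitter_elems.2) ∧
  window_no_twitter_elems (pvDiffWitness_window_no_twitter_elems.1) (pvDiffWitness_window_no_twitter_elems.2) = pvDiffWitnessOut_window_no_twitter_elems.1 ∧
  window_no_twitter_elems_alt (pvDiffWitness_window_no_twitter_elems.1) (pvDiffWitness_window_no_twitter_elems.2) = pvDiffWitnessOut_window_no_twitter_elems.2 ∧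
  pvDiffWitnessOut_window_no_twitter_elems.1 ≠ pvDiffWitnessOut_window_no_twitter_elems.2

def Claim_exact_window_no_twitter_elems : Prop :=
  ∀ (seq : List String) (n : Int), Dom_window_no_twitter_elems seq n →
    Pre_window_no_twitter_elems seq n →
    D_window_no_twitter_elems seq n →
    window_no_twitter_elems seq n ≠ window_no_twitter_elems_alt seq n

-- ===== LEMMAS AND PROOFS =====

-- the per-window output, shared normal form of both sides
def pvOut? (w : List String) : Option String :=
  if w.countP pvBad = 0 then some (PySem.Str.join " " w) else none

theorem containsNonWords_eq_false_iff (xs : List String) :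
    containsNonWords xs = false ↔ xs.countP pvBad = 0 := by
  induction xs with
  | nil => simp [containsNonWords]
  | cons e rest ih =>
    by_cases h : pvBad e = true <;> simp [containsNonWords, h, List.countP_cons, ih]

theorem pvAGo_acc (rest : List String) : ∀ (result acc : List String),
    pvAGo result rest acc = acc ++ pvAGo result rest [] := by
  induction rest with
  | nil => simp [pvAGo]
  | cons e rs ih =>
    intro result acc
    show pvAGo _ rs (if containsNonWords (result.drop 1 ++ [e]) then acc else acc ++ [PySem.Str.join " " (result.drop 1 ++ [e])]) = acc ++ pvAGo _ rs (if containsNonWords (result.drop 1 ++ [e]) then [] else [] ++ [PySem.Str.join " " (result.drop 1 ++ [e])])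
    by_cases h : containsNonWords (result.drop 1 ++ [e]) = true
    · rw [if_pos h, if_pos h]
      exact ih _ acc
    · rw [if_neg h, if_neg h, List.nil_append,
        ih _ (acc ++ _), ih _ [PySem.Str.join " " (result.drop 1 ++ [e])],
        List.append_assoc]

theorem pvAGo_slide (seq : List String) (k : Nat) (hk : 1 ≤ k) :
    ∀ (m j : Nat), j + k + m = seq.length →
    pvAGo ((seq.drop j).take k) (seq.drop (j + k)) [] =
      (List.range' (j + 1) m).filterMap (fun i => pvOut? ((seq.drop i).take k)) := by
  intro m
  induction m with
  | zero =>
    intro j hj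
    rw [show List.drop (j + k) seq = [] from List.drop_eq_nil_of_le (by omega)]
    simp [pvAGo]
  | succ m ih =>
    intro j hj
    have hlt : j + k < seq.length := by omega
    have hw : ((seq.drop j).take k).drop 1 ++ [seq[j + k]] = (seq.drop (j + 1)).take k := by
      obtain ⟨k', rfl⟩ : ∃ k', k = k' + 1 := ⟨k - 1, by omega⟩
      have hlen : k' < (seq.drop (j + 1)).length := by
        rw [List.length_drop]; omega
      have h1 : ((seq.drop j).take (k' + 1)).drop 1 = (seq.drop (j + 1)).take k' := by
        rw [List.drop_take, List.drop_drop]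
        congr 1
      have h2 : (seq.drop (j + 1))[k'] = seq[j + (k' + 1)] := by
        rw [List.getElem_drop]
        congr 1
        omega
      rw [h1, ← h2, List.take_add_one, List.getElem?_eq_getElem hlen]
      simp
    rw [List.drop_eq_getElem_cons hlt]
    simp only [pvAGo]
    rw [hw, pvAGo_acc, show j + k + 1 = (j + 1) + k by omega, ih (j + 1) (by omega),
      List.range'_succ, List.filterMap_cons]
    by_cases h : ((seq.drop (j + 1)).take k).countP pvBad = 0
    · have hc : containsNonWords ((seq.drop (j + 1)).take k) = false :=
        (containsNonWords_eq_false_iff _).mpr h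
      rw [hc, pvOut?, if_pos h]
      simp
    · have hc : containsNonWords ((seq.drop (j + 1)).take k) = true := by
        cases hcc : containsNonWords ((seq.drop (j + 1)).take k) with
        | false => exact absurd ((containsNonWords_eq_false_iff _).mp hcc) h
        | true => rfl
      rw [hc, pvOut?, if_neg h]
      simp

theorem pre_foldl (seq : List String) :
    seq.foldl (fun p w => p ++ [p.getLast! + (if pvBad w then 1 else 0)]) ([0] : List Int) =
      (List.range (seq.length + 1)).map (fun i => ((seq.take i).countP pvBad : Int)) := by
  induction seq using List.reverseRecOn with
  | nil => simp
  | append_singleton ys w ih =>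
    rw [List.foldl_append, ih]
    have hlast : ((List.range (ys.length + 1)).map
        (fun i => ((ys.take i).countP pvBad : Int))).getLast! = ((ys.countP pvBad : Int)) := by
      rw [List.range_succ, List.map_append]
      simp
    rw [List.foldl_cons, List.foldl_nil, hlast]
    rw [show (ys ++ [w]).length + 1 = (ys.length + 1) + 1 by simp]
    rw [List.range_succ (n := ys.length + 1), List.map_append]
    congr 1
    · apply List.map_congr_left
      intro i hi
      rw [List.mem_range] at hi
      rw [List.take_append_of_le_length (by omega)]
    · have ht : (ys ++ [w]).take (ys.length + 1) = ys ++ [w] := List.take_of_length_le (by simp)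
      simp only [List.map_cons, List.map_nil, ht, List.countP_append, List.countP_singleton]
      by_cases h : pvBad w = true <;> simp [h]

theorem alt_normal (seq : List String) (n : Int) (hn : 0 ≤ n) (hle : n ≤ (seq.length : Int)) :
    window_no_twitter_elems_alt seq n =
      (List.range (seq.length - n.toNat + 1)).filterMap
        (fun j => pvOut? ((seq.drop j).take n.toNat)) := by
  have hnk : n = (n.toNat : Int) := (Int.toNat_of_nonneg hn).symm
  set k := n.toNat with hk
  have hkle : k ≤ seq.length := by omega
  rw [window_no_twitter_elems_alt]
  rw [if_neg (by omega)]
  rw [pre_foldl]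
  rw [hnk, show ((seq.length : Int) - (k : Int) + 1) = ((seq.length - k + 1 : Nat) : Int) by push_cast [hkle]; ring]
  rw [PySem.List.pyRange_zero_nat, List.filterMap_map]
  apply List.filterMap_congr
  intro j hj
  rw [List.mem_range] at hj
  have hjk : j + k ≤ seq.length := by omega
  simp only [Function.comp_apply]
  rw [show ((j : Int) + (k : Int)) = ((j + k : Nat) : Int) by push_cast; ring]
  rw [PySem.List.pyGetD_natCast, PySem.List.pyGetD_natCast,
    PySem.List.slice_natCast, Nat.add_sub_cancel_left]
  rw [List.getD_eq_getElem?_getD, List.getD_eq_getElem?_getD,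
    List.getElem?_map, List.getElem?_map, List.getElem?_range (by omega),
    List.getElem?_range (by omega)]
  simp only [Option.map_some, Option.getD_some, pvOut?]
  have hsum : (seq.take (j + k)).countP pvBad
      = (seq.take j).countP pvBad + ((seq.drop j).take k).countP pvBad := by
    rw [List.take_add, List.countP_append]
  by_cases h : ((seq.drop j).take k).countP pvBad = 0
  · rw [if_pos (by simp [hsum, h]), if_pos h]
  · rw [if_neg (by simp [hsum]; exact List.countP_pos_iff.mp (Nat.pos_of_ne_zero h)), if_neg h]

theorem a_normal (seq : List String) (n : Int) (hn : 1 ≤ n) (hle : n ≤ (seq.length : Int)) :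
    window_no_twitter_elems seq n =
      (List.range (seq.length - n.toNat + 1)).filterMap
        (fun j => pvOut? ((seq.drop j).take n.toNat)) := by
  have hnk : n = (n.toNat : Int) := (Int.toNat_of_nonneg (by omega)).symm
  set k := n.toNat with hkdef
  have hk1 : 1 ≤ k := by omega
  have hkle : k ≤ seq.length := by omega
  simp only [window_no_twitter_elems]
  have hres : (seq.take k).length = k := List.length_take_of_le hkle
  have hcond : (((seq.take k).length : Int) == n) = true := by
    rw [hres, hnk]; simp
  rw [hcond, Bool.true_and]
  have hslide := pvAGo_slide seq k hk1 (seq.length - k) 0 (by omega)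
  simp only [List.drop_zero, Nat.zero_add] at hslide
  rw [pvAGo_acc, hslide]
  rw [List.range_eq_range', List.range'_succ, List.filterMap_cons]
  simp only [List.drop_zero]
  by_cases h : (seq.take k).countP pvBad = 0
  · rw [(containsNonWords_eq_false_iff _).mpr h, pvOut?, if_pos h]
    simp
    rfl
  · have hc : containsNonWords (seq.take k) = true := by
      cases hcc : containsNonWords (seq.take k) with
      | false => exact absurd ((containsNonWords_eq_false_iff _).mp hcc) h
      | true => rfl
    rw [hc, pvOut?, if_neg h]
    simp

theorem pvFilterMap_const_some {α β : Type} (l : List α) (b : β) :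
    l.filterMap (fun _ => some b) = l.map (fun _ => b) := by
  induction l with
  | nil => rfl
  | cons x xs ih => simp [List.filterMap_cons, ih]

theorem pvAGo_all_empty : ∀ (rest : List String), (∀ x ∈ rest, x = "") →
    ∀ w : List String, w.drop 1 = [] → pvAGo w rest [] = rest.map (fun _ => "") := by
  intro rest
  induction rest with
  | nil => intro _ w _; rfl
  | cons e rs ih =>
    intro hall w hw
    simp only [pvAGo, hw, List.nil_append]
    have he : e = "" := hall e (by simp)
    subst he
    rw [show containsNonWords [""] = false from by decide]
    simp only [Bool.false_eq_true, if_false]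
    rw [pvAGo_acc, ih (fun x hx => hall x (by simp [hx])) [""] rfl]
    rw [show PySem.Str.join " " [""] = "" from by decide]
    simp

-- ===== VERDICT =====
theorem window_no_twitter_elems_spec : Claim_unchanged_window_no_twitter_elems := by
  intro seq n hdom hpre hnd
  have hn : 0 ≤ n := hpre
  by_cases hbig : (seq.length : Int) < n
  · have hk : seq.length ≤ n.toNat := by omega
    simp only [window_no_twitter_elems]
    rw [List.take_of_length_le hk, List.drop_eq_nil_of_le hk]
    rw [window_no_twitter_elems_alt, if_pos hbig]
    have hcond : (((seq.length : Int)) == n) = false := by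
      simp only [beq_eq_false_iff_ne, ne_eq]
      omega
    rw [hcond, Bool.false_and]
    simp [pvAGo]
  · have hle : n ≤ (seq.length : Int) := (by omega : n ≤ (seq.length : Int))
    by_cases h1 : 1 ≤ n
    · rw [a_normal seq n h1 hle, alt_normal seq n hn hle]
    · have hn0 : n = 0 := by omega
      subst hn0
      have hall : ∀ x ∈ seq, x = "" := by
        intro x hx
        by_contra hne
        exact hnd (by unfold D_window_no_twitter_elems; exact ⟨rfl, x, hx, hne⟩)
      rw [alt_normal seq 0 le_rfl hle]
      simp only [window_no_twitter_elems, Int.toNat_zero, List.take_zero, List.drop_zero]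
      rw [show (if ((([] : List String).length : Int) == (0 : Int)) && !containsNonWords []
          then [PySem.Str.join " " []] else []) = [""] from by decide]
      rw [pvAGo_acc, pvAGo_all_empty seq hall [] rfl]
      have hpv : pvOut? ([] : List String) = some "" := by decide
      rw [show (fun x : Nat => pvOut? ([] : List String)) = (fun _ : Nat => some (""))
        from funext (fun j => hpv)]
      rw [pvFilterMap_const_some]
      simp [List.map_const', List.length_range, List.replicate_succ]

theorem window_no_twitter_elems_changed : Claim_changed_window_no_twitter_elems := by
  unfold Claim_changed_window_no_twitter_elems; decide

theorem pvAGo_singleton : ∀ (rest : List String) (w : List String), w.drop 1 = [] →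
    pvAGo w rest [] = rest.filterMap (fun e => if pvBad e then none else some e) := by
  intro rest
  induction rest with
  | nil => intro w _; rfl
  | cons e rs ih =>
    intro w hw
    simp only [pvAGo, hw, List.nil_append, List.filterMap_cons]
    by_cases hb : pvBad e = true
    · rw [show containsNonWords [e] = true from by simp [containsNonWords, hb]]
      simp only [if_pos hb, hb, ite_true]
      exact ih [e] rfl
    · rw [show containsNonWords [e] = false from by simp [containsNonWords, hb]]
      simp only [Bool.false_eq_true, if_false, hb]
      rw [pvAGo_acc, ih [e] rfl]
      rw [show PySem.Str.join " " [e] = e from by simp [PySem.Str.join]]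
      simp

theorem pv_a_zero (seq : List String) :
    window_no_twitter_elems seq 0 =
      "" :: seq.filterMap (fun e => if pvBad e then none else some e) := by
  simp only [window_no_twitter_elems, Int.toNat_zero, List.take_zero, List.drop_zero]
  rw [show (if ((([] : List String).length : Int) == (0 : Int)) && !containsNonWords []
      then [PySem.Str.join " " []] else []) = [""] from by decide]
  rw [pvAGo_acc, pvAGo_singleton seq [] rfl]
  simp

theorem pv_alt_zero (seq : List String) :
    window_no_twitter_elems_alt seq 0 = List.replicate (seq.length + 1) "" := by
  rw [alt_normal seq 0 le_rfl (by positivity)]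
  simp only [Int.toNat_zero, List.take_zero]
  have hpv : pvOut? ([] : List String) = some "" := by decide
  rw [show (fun x : Nat => pvOut? ([] : List String)) = (fun _ : Nat => some (""))
    from funext (fun j => hpv)]
  rw [pvFilterMap_const_some]
  simp [List.map_const', List.length_range]

theorem window_no_twitter_elems_tight : Claim_exact_window_no_twitter_elems := by
  intro seq n hdom hpre hd
  have hd' := hd
  unfold D_window_no_twitter_elems at hd'
  obtain ⟨hn0, x, hx, hne⟩ := hd'
  subst hn0
  rw [pv_a_zero, pv_alt_zero]
  intro heq
  by_cases hb : pvBad x = true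
  · have hlen := congrArg List.length heq
    simp only [List.length_cons, List.length_replicate, List.length_filterMap_eq_countP] at hlen
    have hall := List.countP_eq_length.mp (by omega :
      seq.countP (fun a => ((if pvBad a then none else some a) : Option String).isSome) = seq.length)
    have := hall x hx
    simp [hb] at this
  · have hmem : x ∈ "" :: seq.filterMap (fun e => if pvBad e then none else some e) := by
      exact List.mem_cons_of_mem _ (List.mem_filterMap.mpr ⟨x, hx, by simp [hb]⟩)
    rw [heq] at hmem
    exact hne (List.eq_of_mem_replicate hmem)
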